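-- pv_equiv track=rewrite | github.com/cthiounn/adventofcode-2023-python | day11.py | num_empty_lines_in_between
-- ===== SOURCE A (Python) =====
-- def num_empty_lines_in_between(galaxy_item1, galaxy_item2, list_of_empty_lines):
--     if galaxy_item1>galaxy_item2:
--         galaxy_item1, galaxy_item2=galaxy_item2, galaxy_item1
--     if galaxy_item1==galaxy_item2:
--         return 0
--     num_empty_lines=0
--     for i in range(galaxy_item1+1, galaxy_item2):
--         if i in list_of_empty_lines:
--             num_empty_lines+=1
--     return num_empty_lines
-- ===== SOURCE B (Python) =====
-- def num_empty_lines_in_between(galaxy_item1, galaxy_item2, list_of_empty_lines):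
--     lo = min(galaxy_item1, galaxy_item2)
--     hi = max(galaxy_item1, galaxy_item2)
--     return len({x for x in list_of_empty_lines if lo < x < hi})
-- ===== Notes on version B (the rewrite author's own statement) =====
-- stated objective: faster
-- what changed: Instead of looping over every integer in range(g1+1, g2) and scanning the list for membership, B makes a single pass over the list, counting the distinct elements strictly between min and max via a set comprehension.
import Mathlib
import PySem

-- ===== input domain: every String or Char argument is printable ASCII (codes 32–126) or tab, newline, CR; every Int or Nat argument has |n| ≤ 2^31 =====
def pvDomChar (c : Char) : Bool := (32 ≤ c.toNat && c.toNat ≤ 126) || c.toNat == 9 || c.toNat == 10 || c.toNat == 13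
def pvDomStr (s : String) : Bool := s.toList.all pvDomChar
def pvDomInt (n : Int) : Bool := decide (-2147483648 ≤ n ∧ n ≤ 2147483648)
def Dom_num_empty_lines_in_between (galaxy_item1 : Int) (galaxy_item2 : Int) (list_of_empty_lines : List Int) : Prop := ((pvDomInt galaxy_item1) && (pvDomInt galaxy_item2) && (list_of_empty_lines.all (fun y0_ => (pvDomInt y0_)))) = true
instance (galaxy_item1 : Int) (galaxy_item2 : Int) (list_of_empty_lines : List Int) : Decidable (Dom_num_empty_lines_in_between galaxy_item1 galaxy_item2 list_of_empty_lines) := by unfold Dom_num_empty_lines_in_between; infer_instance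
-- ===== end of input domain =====

-- ===== PORT A =====
-- B: one pass over the list counting distinct elements strictly between min and max (A loops over the range).
def num_empty_lines_in_between (galaxy_item1 : Int) (galaxy_item2 : Int) (list_of_empty_lines : List Int) : Int :=
  let p := if galaxy_item1 > galaxy_item2 then (galaxy_item2, galaxy_item1) else (galaxy_item1, galaxy_item2)
  let g1 := p.1
  let g2 := p.2
  if g1 = g2 then 0
  else (PySem.List.pyRange (g1 + 1) g2 1).foldl
    (fun acc i => if i ∈ list_of_empty_lines then acc + 1 else acc) 0

-- ===== PORT B =====
def num_empty_lines_in_between_alt (galaxy_item1 : Int) (galaxy_item2 : Int) (list_of_empty_lines : List Int) : Int :=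
  let lo := min galaxy_item1 galaxy_item2
  let hi := max galaxy_item1 galaxy_item2
  ((PySem.Set.ofList (list_of_empty_lines.filter (fun x => lo < x && x < hi))).length : Int)

-- ===== PRECONDITION & SPEC =====
def Spec_num_empty_lines_in_between (galaxy_item1 : Int) (galaxy_item2 : Int) (list_of_empty_lines : List Int) (out : Int) : Prop := out = num_empty_lines_in_between_alt galaxy_item1 galaxy_item2 list_of_empty_lines
instance (galaxy_item1 : Int) (galaxy_item2 : Int) (list_of_empty_lines : List Int) (out : Int) : Decidable (Spec_num_empty_lines_in_between galaxy_item1 galaxy_item2 list_of_empty_lines out) := by unfold Spec_num_empty_lines_in_between; infer_instance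

-- ===== CLAIM (what is proved, stated in full; the proofs are below) =====
def Claim_equal_num_empty_lines_in_between : Prop := ∀ (galaxy_item1 : Int) (galaxy_item2 : Int) (list_of_empty_lines : List Int), Dom_num_empty_lines_in_between galaxy_item1 galaxy_item2 list_of_empty_lines → Spec_num_empty_lines_in_between galaxy_item1 galaxy_item2 list_of_empty_lines (num_empty_lines_in_between galaxy_item1 galaxy_item2 list_of_empty_lines)

-- ===== LEMMAS AND PROOFS =====

-- ===== VERDICT (by name: the statement is the Claim_ definition above) =====
-- Two nodup lists with the same members have the same length.
theorem pv_len_eq_of_nodup_of_mem_iff {s t : List Int} (hs : s.Nodup) (ht : t.Nodup)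
    (h : ∀ x, x ∈ s ↔ x ∈ t) : s.length = t.length := by
  have : s.toFinset = t.toFinset := by
    ext x; simp [h x]
  calc s.length = s.toFinset.card := (List.toFinset_card_of_nodup hs).symm
    _ = t.toFinset.card := by rw [this]
    _ = t.length := List.toFinset_card_of_nodup ht

theorem pv_core (lo hi : Int) (l : List Int) :
    (PySem.List.pyRange (lo + 1) hi 1).foldl
      (fun acc i => if i ∈ l then acc + 1 else acc) (0 : Int)
    = ((PySem.Set.ofList (l.filter (fun x => lo < x && x < hi))).length : Int) := by
  rw [PySem.List.foldl_ite_add_one]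
  have hlen : ((PySem.List.pyRange (lo + 1) hi 1).countP (fun i => decide (i ∈ l)))
      = (PySem.Set.ofList (l.filter (fun x => lo < x && x < hi))).length := by
    rw [List.countP_eq_length_filter]
    apply pv_len_eq_of_nodup_of_mem_iff
    · exact (PySem.List.nodup_pyRange_one _ _).filter _
    · exact PySem.Set.nodup_ofList _
    · intro x
      simp [List.mem_filter, PySem.List.mem_pyRange_one, PySem.Set.mem_ofList]
      constructor
      · rintro ⟨⟨h1, h2⟩, h3⟩; exact ⟨h3, by omega, h2⟩
      · rintro ⟨h3, h1, h2⟩; exact ⟨⟨by omega, h2⟩, h3⟩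
  omega

-- ===== VERDICT (by name: the statement is the Claim_ definition above) =====
theorem num_empty_lines_in_between_spec : Claim_equal_num_empty_lines_in_between := by
  intro g1 g2 l _
  unfold Spec_num_empty_lines_in_between num_empty_lines_in_between num_empty_lines_in_between_alt
  by_cases hgt : g1 > g2 <;> simp only [hgt, if_true, if_false]
  · by_cases heq : g2 = g1 <;> simp only [heq, if_true, if_false]
    · omega
    · rw [pv_core g2 g1 l]
      have : min g1 g2 = g2 := by omega
      have h2 : max g1 g2 = g1 := by omega
      rw [this, h2]
  · by_cases heq : g1 = g2 <;> simp only [heq, if_true, if_false]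
    · have : min g2 g2 = g2 := by omega
      have h2 : max g2 g2 = g2 := by omega
      rw [this, h2]
      have : (l.filter (fun x => g2 < x && x < g2)) = [] := by
        apply List.filter_eq_nil_iff.mpr; intro x _; simp; omega
      simp [this, PySem.Set.ofList]
    · rw [pv_core g1 g2 l]
      have : min g1 g2 = g1 := by omega
      have h2 : max g1 g2 = g2 := by omega
      rw [this, h2]
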